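-- pv_equiv track=rewrite | github.com/ryanm36417/TCS_Projects | DataStructures/recursion/recurision_practice.py | can_reach_zero
-- ===== SOURCE A (Python) =====
-- def can_reach_zero(num):
--     if num <= 1:
--         return True
--     elif num % 10 == 0:
--         return False
--     else:
--         strnum = str(num)
--         char_array = [int(c) for c in strnum]
--         total = sum(char_array)
--         total = num // total
--         return can_reach_zero(total)
-- ===== SOURCE B (Python) =====
-- def can_reach_zero(num):
--     # Iterative loop; digit sum computed arithmetically (divmod) instead of via str().
--     while num > 1:
--         if num % 10 == 0:
--             return False
--         s = 0
--         n = num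
--         while n > 0:
--             s += n % 10
--             n //= 10
--         num //= s
--     return True
-- ===== Notes on version B (the rewrite author's own statement) =====
-- stated objective: alternative
-- what changed: Replaces A's recursion with an iterative while-loop and computes each digit sum arithmetically with divmod instead of converting the number to a string and summing int(c) over its characters.
import Mathlib
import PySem

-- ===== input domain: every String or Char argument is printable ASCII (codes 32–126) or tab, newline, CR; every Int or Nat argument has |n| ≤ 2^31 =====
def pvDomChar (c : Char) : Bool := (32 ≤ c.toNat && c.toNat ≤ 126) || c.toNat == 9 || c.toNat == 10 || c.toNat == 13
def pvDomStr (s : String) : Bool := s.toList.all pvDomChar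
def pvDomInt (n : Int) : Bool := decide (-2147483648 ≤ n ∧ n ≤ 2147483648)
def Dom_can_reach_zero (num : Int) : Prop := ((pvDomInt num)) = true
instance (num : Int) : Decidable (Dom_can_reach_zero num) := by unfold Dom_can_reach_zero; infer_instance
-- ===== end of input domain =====

-- B replaces A's recursion with an iterative loop and computes the digit sum arithmetically
-- (divmod) instead of via str(); same value on every input.

-- ===== PORT A =====
-- A's recursion, with a fuel guard for totality only (fuel num.toNat+1 is never exhausted:
-- in the recursive branch the digit sum is ≥ 2, so num strictly decreases each call).
def can_reach_zero_go (fuel : Nat) (num : Int) : Bool :=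
  match fuel with
  | 0 => true
  | fuel + 1 =>
    if num ≤ 1 then true
    else if PySem.Int.mod num 10 = 0 then false
    else
      -- strnum = str(num); char_array = [int(c) for c in strnum]
      -- int(c) ported as (ofChars? [c]).getD 0: exact here, every char of str(num) for num ≥ 2 is a digit
      let strnum := PySem.Int.toStr num
      let char_array := strnum.toList.map (fun c => (PySem.Int.ofChars? [c]).getD 0)
      let total := char_array.sum
      let total := PySem.Int.floordiv num total
      can_reach_zero_go fuel total

def can_reach_zero (num : Int) : Bool := can_reach_zero_go (num.toNat + 1) num

-- ===== PORT B =====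
-- inner loop: while n > 0: s += n % 10; n //= 10
def pvDigitSumGo (n : Int) (s : Int) : Int :=
  if _h : 0 < n then pvDigitSumGo (PySem.Int.floordiv n 10) (s + PySem.Int.mod n 10) else s
termination_by n.toNat
decreasing_by
  have h10 : PySem.Int.floordiv n 10 = n / 10 := PySem.Int.floordiv_eq_ediv_of_pos (by omega)
  rw [h10]; omega

-- outer loop: while num > 1: …  (same fuel guard for totality only)
def can_reach_zero_alt_go (fuel : Nat) (num : Int) : Bool :=
  match fuel with
  | 0 => true
  | fuel + 1 =>
    if num > 1 then
      if PySem.Int.mod num 10 = 0 then false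
      else can_reach_zero_alt_go fuel (PySem.Int.floordiv num (pvDigitSumGo num 0))
    else true

def can_reach_zero_alt (num : Int) : Bool := can_reach_zero_alt_go (num.toNat + 1) num

-- ===== PRECONDITION & SPEC =====
def Spec_can_reach_zero (num : Int) (out : Bool) : Prop := out = can_reach_zero_alt num
instance (num : Int) (out : Bool) : Decidable (Spec_can_reach_zero num out) := by unfold Spec_can_reach_zero; infer_instance

-- ===== CLAIM (what is proved, stated in full; the proofs are below) =====
def Claim_equal_can_reach_zero : Prop := ∀ (num : Int), Dom_can_reach_zero num → Spec_can_reach_zero num (can_reach_zero num)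

-- ===== LEMMAS AND PROOFS =====

-- B's inner loop computes s + the decimal digit sum (Nat.digits) of n.toNat
theorem pvDigitSumGo_eq (n s : Int) : pvDigitSumGo n s = s + ((Nat.digits 10 n.toNat).sum : Int) := by
  by_cases h : 0 < n
  · generalize hk : n.toNat = k
    induction k using Nat.strong_induction_on generalizing n s with
    | _ k ih =>
      rw [pvDigitSumGo, dif_pos h]
      have h10 : PySem.Int.floordiv n 10 = n / 10 := PySem.Int.floordiv_eq_ediv_of_pos (by omega)
      have hm : PySem.Int.mod n 10 = n % 10 := PySem.Int.mod_eq_emod_of_pos (by omega)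
      have hkpos : 0 < k := by omega
      rw [h10]
      by_cases h2 : 0 < n / 10
      · have hlt : (n / 10).toNat < k := by omega
        rw [ih (n / 10).toNat (by omega) (n / 10) (s + PySem.Int.mod n 10) (by omega) rfl]
        rw [Nat.digits_def' (by norm_num : (1:ℕ) < 10) (by omega : 0 < k)]
        simp only [List.sum_cons]
        have e1 : (n / 10).toNat = k / 10 := by omega
        have e2 : PySem.Int.mod n 10 = ((k % 10 : Nat) : Int) := by rw [hm]; omega
        rw [e1, e2]; push_cast; ring
      · -- n / 10 ≤ 0, so n < 10 and the recursive call returns its accumulator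
        have hn10 : n < 10 := by omega
        rw [pvDigitSumGo, dif_neg h2]
        rw [Nat.digits_def' (by norm_num : (1:ℕ) < 10) (by omega : 0 < k)]
        have : k / 10 = 0 := by omega
        rw [this]
        simp only [Nat.digits_zero, List.sum_cons, List.sum_nil]
        have e2 : PySem.Int.mod n 10 = ((k % 10 : Nat) : Int) := by rw [hm]; omega
        rw [e2]; push_cast; ring
  · rw [pvDigitSumGo, dif_neg h]
    have : n.toNat = 0 := by omega
    rw [this]; simp

-- Nat.toDigitsCore with enough fuel lists the digits (big-endian) in front of the accumulator
theorem toDigitsCore_eq (fuel : Nat) : ∀ (n : Nat) (ds : List Char), 0 < n → n < fuel →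
    Nat.toDigitsCore 10 fuel n ds = ((Nat.digits 10 n).map Nat.digitChar).reverse ++ ds := by
  induction fuel with
  | zero => intro n ds h1 h2; omega
  | succ fuel ih =>
    intro n ds h1 h2
    rw [Nat.toDigitsCore]
    rw [Nat.digits_def' (by norm_num : (1:ℕ) < 10) h1]
    by_cases h : n / 10 = 0
    · rw [if_pos h, h]
      simp
    · rw [if_neg h, ih (n / 10) _ (by omega) (by omega)]
      simp

-- int(digitChar d) = d for decimal digits
theorem ofChars_digitChar (d : Nat) (hd : d < 10) :
    (PySem.Int.ofChars? [Nat.digitChar d]).getD 0 = (d : Int) := by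
  interval_cases d <;> decide

-- A's string-based digit sum equals the Nat.digits sum, for num ≥ 2
theorem strSum_eq (num : Int) (h : 1 < num) :
    ((PySem.Int.toStr num).toList.map (fun c => (PySem.Int.ofChars? [c]).getD 0)).sum
      = ((Nat.digits 10 num.toNat).sum : Int) := by
  rw [PySem.Int.toList_toStr]
  unfold PySem.Int.toChars
  rw [if_neg (by omega)]
  unfold Nat.toDigits
  rw [toDigitsCore_eq (num.toNat + 1) num.toNat [] (by omega) (by omega)]
  rw [List.append_nil, List.map_reverse, List.sum_reverse, List.map_map]
  have hmap : List.map ((fun c => (PySem.Int.ofChars? [c]).getD 0) ∘ Nat.digitChar) (Nat.digits 10 num.toNat)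
      = List.map Nat.cast (Nat.digits 10 num.toNat) :=
    List.map_congr_left (fun d hd => ofChars_digitChar d (Nat.digits_lt_base (by norm_num) hd))
  rw [hmap, ← Nat.cast_list_sum]

-- the two fueled loops agree for every fuel
theorem go_eq (fuel : Nat) : ∀ (num : Int), can_reach_zero_go fuel num = can_reach_zero_alt_go fuel num := by
  induction fuel with
  | zero => intro num; rfl
  | succ fuel ih =>
    intro num
    rw [can_reach_zero_go, can_reach_zero_alt_go]
    by_cases h1 : num ≤ 1
    · rw [if_pos h1, if_neg (show ¬ num > 1 by omega)]
    · rw [if_neg h1, if_pos (show num > 1 by omega)]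
      by_cases h2 : PySem.Int.mod num 10 = 0
      · simp only [if_pos h2]
      · simp only [if_neg h2]
        show can_reach_zero_go fuel
            (PySem.Int.floordiv num (((PySem.Int.toStr num).toList.map
              (fun c => (PySem.Int.ofChars? [c]).getD 0)).sum)) = _
        rw [strSum_eq num (by omega), ih, pvDigitSumGo_eq num 0, zero_add]

-- ===== VERDICT (by name: the statement is the Claim_ definition above) =====
theorem can_reach_zero_spec : Claim_equal_can_reach_zero := by
  intro num _
  unfold Spec_can_reach_zero can_reach_zero can_reach_zero_alt
  exact go_eq (num.toNat + 1) num
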